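-- pv_equiv track=rewrite | github.com/blgcismt/ITI1120 | labs/lab5.py | ah
-- ===== SOURCE A (Python) =====
-- def ah(l, x, y):
--     '''(list, int,int)->(int,number/+inf)
--     Returns two numbers such that ...
--     Precondition: x <= y
--                   and list l contains numbers
--     '''
--     count = 0
--     min = None
--     for i in l:
--         if i >= x and i <= y:
--             count += 1
--             if min == None:
--                 min = i
--             elif i < min:
--                 min = i
--     return count, min
-- ===== SOURCE B (Python) =====
-- def _cut(s, pred):
--     # first index whose element does NOT satisfy pred, in a sorted list
--     # (pred is downward-closed along the order), by binary search
--     a, b = 0, len(s)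
--     while a < b:
--         m = (a + b) // 2
--         if pred(s[m]):
--             a = m + 1
--         else:
--             b = m
--     return a
--
-- def ah(l, x, y):
--     s = sorted(l)
--     lo = _cut(s, lambda v: v < x)   # elements below the range
--     hi = _cut(s, lambda v: v <= y)  # elements not above the range
--     if lo < hi:
--         return hi - lo, s[lo]
--     return 0, None
-- ===== Notes on version B (the rewrite author's own statement) =====
-- stated objective: alternative
-- what changed: Sorts the list once and locates the range [x,y] with two hand-written binary searches: the count is the difference of the two cut indices and the minimum is the element at the lower cut, replacing A's single-pass count-and-running-min scan.
import Mathlib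
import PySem

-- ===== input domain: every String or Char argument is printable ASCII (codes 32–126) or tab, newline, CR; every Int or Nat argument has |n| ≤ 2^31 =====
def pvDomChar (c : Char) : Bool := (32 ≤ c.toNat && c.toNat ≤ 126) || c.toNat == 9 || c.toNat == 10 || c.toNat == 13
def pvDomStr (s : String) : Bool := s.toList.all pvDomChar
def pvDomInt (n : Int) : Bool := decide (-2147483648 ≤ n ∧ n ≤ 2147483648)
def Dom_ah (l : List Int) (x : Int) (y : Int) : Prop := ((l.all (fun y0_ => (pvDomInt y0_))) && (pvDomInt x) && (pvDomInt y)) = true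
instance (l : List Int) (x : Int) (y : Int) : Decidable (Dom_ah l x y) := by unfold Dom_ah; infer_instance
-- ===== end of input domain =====

-- B sorts the list once and finds the range [x,y] by two binary searches (count = difference
-- of the two cut indices, minimum = element at the lower cut), replacing A's single scan; objective: alternative.
-- ===== PORT A =====
def ah (l : List Int) (x : Int) (y : Int) : Int × Option Int :=
  l.foldl (fun (s : Int × Option Int) i =>
    if i ≥ x ∧ i ≤ y then
      match s.2 with
      | none => (s.1 + 1, some i)
      | some m => if i < m then (s.1 + 1, some i) else (s.1 + 1, some m)
    else s) (0, none)

-- ===== PORT B =====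
-- port of Source B's `_cut`: the while loop becomes recursion on b - a; Python's s[m] is a
-- valid-index access (a ≤ m < b ≤ len(s) whenever taken), so `getD m 0` is exact there
def cut (s : List Int) (p : Int → Bool) (a b : Nat) : Nat :=
  if a < b then
    if p (s.getD ((a + b) / 2) 0) then cut s p ((a + b) / 2 + 1) b
    else cut s p a ((a + b) / 2)
  else a
termination_by b - a
decreasing_by all_goals omega

def ah_alt (l : List Int) (x : Int) (y : Int) : Int × Option Int :=
  let s := PySem.List.sorted l (fun v => v) false
  let lo := cut s (fun v => decide (v < x)) 0 s.length
  let hi := cut s (fun v => decide (v ≤ y)) 0 s.length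
  if lo < hi then ((hi : Int) - (lo : Int), some (s.getD lo 0))  -- s[lo]: lo < hi ≤ len(s)
  else (0, none)

-- ===== PRECONDITION & SPEC =====
def Spec_ah (l : List Int) (x : Int) (y : Int) (out : Int × Option Int) : Prop := out = ah_alt l x y
instance (l : List Int) (x : Int) (y : Int) (out : Int × Option Int) : Decidable (Spec_ah l x y out) := by unfold Spec_ah; infer_instance

-- ===== CLAIM =====
def Claim_equal_ah : Prop := ∀ (l : List Int) (x : Int) (y : Int), Dom_ah l x y → Spec_ah l x y (ah l x y)

-- ===== LEMMAS AND PROOFS =====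

-- A's running-min accumulator
def runMin (m : Option Int) (sub : List Int) : Option Int :=
  sub.foldl (fun acc i =>
    match acc with
    | none => some i
    | some a => if i < a then some i else some a) m

lemma runMin_some (a : Int) (sub : List Int) :
    runMin (some a) sub = some (sub.foldl min a) := by
  induction sub generalizing a with
  | nil => rfl
  | cons h t ih =>
      simp only [runMin, List.foldl] at *
      rw [show (if h < a then some h else some a) = some (min a h) by
        split_ifs with hc <;> simp [min_def] <;> omega]
      exact ih (min a h)

-- characterisation of A's fold
lemma fold_eq (x y : Int) (l : List Int) : ∀ (c : Int) (m : Option Int),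
    l.foldl (fun (s : Int × Option Int) i =>
      if i ≥ x ∧ i ≤ y then
        match s.2 with
        | none => (s.1 + 1, some i)
        | some mm => if i < mm then (s.1 + 1, some i) else (s.1 + 1, some mm)
      else s) (c, m)
    = (c + (l.filter (fun i => decide (x ≤ i ∧ i ≤ y))).length,
       runMin m (l.filter (fun i => decide (x ≤ i ∧ i ≤ y)))) := by
  induction l with
  | nil => intro c m; simp [runMin]
  | cons h t ih =>
      intro c m
      by_cases hp : x ≤ h ∧ h ≤ y
      ·
        cases m with
        | none =>
            simp only [List.foldl, List.filter, hp, runMin]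
            rw [ih]
            simp [runMin]
            omega
        | some a =>
            simp only [List.foldl, List.filter, hp, decide_true, and_self, if_true]
            have hcons : runMin (some a) (h :: t.filter (fun i => decide (x ≤ i ∧ i ≤ y)))
                = runMin (some (min a h)) (t.filter (fun i => decide (x ≤ i ∧ i ≤ y))) := by
              simp only [runMin, List.foldl]
              congr 1
              split_ifs with hc <;> simp [min_def] <;> omega
            rw [hcons]
            by_cases hlt : h < a
            · rw [if_pos hlt, ih, show min a h = h from by omega]
              simp only [Prod.mk.injEq, List.length_cons]
              exact ⟨by push_cast; omega, trivial⟩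
            · rw [if_neg hlt, ih, show min a h = a from by omega]
              simp only [Prod.mk.injEq, List.length_cons]
              exact ⟨by push_cast; omega, trivial⟩
      · have hp' : ¬ (h ≥ x ∧ h ≤ y) := fun hh => hp ⟨hh.1, hh.2⟩
        simp only [List.foldl, List.filter]
        rw [if_neg hp']
        simp only [show decide (x ≤ h ∧ h ≤ y) = false by simpa using hp]
        exact ih c m

-- binary search returns the unique cut index c once the predicate is "true exactly below c"
lemma cut_eq (s : List Int) (p : Int → Bool) (c : Nat)
    (hp : ∀ i, i < s.length → p (s.getD i 0) = decide (i < c)) :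
    ∀ n a b, b - a ≤ n → a ≤ c → c ≤ b → b ≤ s.length → cut s p a b = c := by
  intro n
  induction n with
  | zero =>
      intro a b h1 h2 h3 h4
      unfold cut
      rw [if_neg (by omega : ¬ a < b)]
      omega
  | succ k ih =>
      intro a b h1 h2 h3 h4
      unfold cut
      by_cases hab : a < b
      · rw [if_pos hab]
        have hmlen : (a + b) / 2 < s.length := by omega
        rw [hp _ hmlen]
        by_cases hmc : (a + b) / 2 < c
        · rw [if_pos (by simpa using hmc)]
          exact ih ((a + b) / 2 + 1) b (by omega) (by omega) h3 h4
        · rw [if_neg (by simpa using hmc)]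
          exact ih a ((a + b) / 2) (by omega) h2 (by omega) (by omega)
      · rw [if_neg hab]; omega

-- on a sorted list, a downward-closed predicate holds exactly on the prefix of length (filter p).length
lemma pred_prefix (s : List Int) (p : Int → Bool)
    (hmono : ∀ u v : Int, u ≤ v → p v = true → p u = true)
    (hs : s.Pairwise (fun a b => a ≤ b)) :
    ∀ i, i < s.length → p (s.getD i 0) = decide (i < (s.filter p).length) := by
  induction s with
  | nil => intro i h; simp at h
  | cons h t ih =>
      intro i hi
      rcases List.pairwise_cons.mp hs with ⟨hh, ht⟩
      by_cases hph : p h = true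
      · cases i with
        | zero => simp [hph, List.filter]
        | succ j =>
            have hj : j < t.length := by simpa using hi
            have := ih ht j hj
            simp only [List.getD_cons_succ, List.filter, hph, List.length_cons]
            rw [this]
            simp only [decide_eq_decide]
            omega
      · have hft : ∀ a ∈ t, ¬ p a = true := by
          intro a ha hpa
          exact hph (hmono h a (hh a ha) hpa)
        have hnil : (h :: t).filter p = [] := by
          rw [List.filter_eq_nil_iff]
          intro a ha
          rcases List.mem_cons.mp ha with rfl | ha'
          · simpa using hph
          · simpa using hft a ha'
        rw [hnil]
        cases i with
        | zero => simp [hph]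
        | succ j =>
            have hj : j < t.length := by simpa using hi
            simp only [List.getD_cons_succ, List.length_nil]
            have : t.getD j 0 ∈ t := by
              rw [List.getD_eq_getElem t 0 hj]; exact List.getElem_mem hj
            simpa using hft _ this
-- splitting the elements ≤ y into those < x and those in [x,y] (needs x ≤ y)
lemma filter_split (x y : Int) (hxy : x ≤ y) (s : List Int) :
    (s.filter (fun v => decide (v ≤ y))).length
      = (s.filter (fun v => decide (v < x))).length
        + (s.filter (fun v => decide (x ≤ v ∧ v ≤ y))).length := by
  induction s with
  | nil => simp
  | cons h t ih =>
      simp only [List.filter]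
      by_cases h2 : h < x
      · have h1 : h ≤ y := by omega
        have h3 : ¬ (x ≤ h ∧ h ≤ y) := by omega
        simp only [decide_eq_true h1, decide_eq_true h2,
          decide_eq_false h3, List.length_cons]
        omega
      · by_cases h1 : h ≤ y
        · have h3 : x ≤ h ∧ h ≤ y := ⟨by omega, h1⟩
          simp only [decide_eq_true h1, decide_eq_false h2,
            decide_eq_true h3, List.length_cons]
          omega
        · have h3 : ¬ (x ≤ h ∧ h ≤ y) := by omega
          simp only [decide_eq_false h1, decide_eq_false h2, decide_eq_false h3]
          exact ih

lemma foldl_min_mem (t : List Int) : ∀ a : Int, t.foldl min a ∈ a :: t := by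
  induction t with
  | nil => intro a; simp
  | cons h t ih =>
      intro a
      have := ih (min a h)
      rcases List.mem_cons.mp this with he | hm
      · rw [List.foldl_cons, he]
        rcases min_choice a h with h' | h' <;> rw [h'] <;> simp
      · simp [List.foldl_cons]
        right; right; exact hm

lemma foldl_min_le (t : List Int) : ∀ a : Int, ∀ b ∈ a :: t, t.foldl min a ≤ b := by
  induction t with
  | nil =>
      intro a b hb
      simp only [List.mem_singleton] at hb
      subst hb
      simp
  | cons h t ih =>
      intro a b hb
      rw [List.foldl_cons]
      have hmem : min a h ∈ min a h :: t := List.mem_cons_self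
      rcases List.mem_cons.mp hb with hba | hb'
      · subst hba
        exact le_trans (ih (min b h) _ hmem) (min_le_left b h)
      · rcases List.mem_cons.mp hb' with hbh | hb''
        · subst hbh
          exact le_trans (ih (min a b) _ hmem) (min_le_right a b)
        · exact ih (min a h) b (List.mem_cons_of_mem _ hb'')

-- ===== VERDICT =====
theorem ah_spec : Claim_equal_ah := by
  intro l x y _
  unfold Spec_ah ah ah_alt
  rw [fold_eq]
  simp only []
  set s := PySem.List.sorted l (fun v => v) false with hsdef
  have hperm : s.Perm l := PySem.List.sorted_perm l (fun v => v) false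
  have hpw : s.Pairwise (fun a b => a ≤ b) := by
    have := PySem.List.sorted_pairwise (xs := l) (key := fun v => v)
    simpa [hsdef] using this
  have hpp1 := pred_prefix s (fun v => decide (v < x)) (fun u v huv hv => by
    simp only [decide_eq_true_eq] at *; omega) hpw
  have hpp2 := pred_prefix s (fun v => decide (v ≤ y)) (fun u v huv hv => by
    simp only [decide_eq_true_eq] at *; omega) hpw
  have hcut1 : cut s (fun v => decide (v < x)) 0 s.length
      = (s.filter (fun v => decide (v < x))).length :=
    cut_eq s _ _ hpp1 s.length 0 s.length (by omega) (by omega)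
      (List.length_filter_le _ _) (le_refl _)
  have hcut2 : cut s (fun v => decide (v ≤ y)) 0 s.length
      = (s.filter (fun v => decide (v ≤ y))).length :=
    cut_eq s _ _ hpp2 s.length 0 s.length (by omega) (by omega)
      (List.length_filter_le _ _) (le_refl _)
  rw [hcut1, hcut2]
  have hfperm : (s.filter (fun v => decide (x ≤ v ∧ v ≤ y))).length
      = (l.filter (fun v => decide (x ≤ v ∧ v ≤ y))).length :=
    (hperm.filter _).length_eq
  by_cases hlt : (s.filter (fun v => decide (v < x))).length
      < (s.filter (fun v => decide (v ≤ y))).length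
  · rw [if_pos hlt]
    have hc1len : (s.filter (fun v => decide (v < x))).length < s.length :=
      lt_of_lt_of_le hlt (List.length_filter_le _ _)
    have hex : x ≤ s.getD (s.filter (fun v => decide (v < x))).length 0 := by
      have := hpp1 _ hc1len
      simp only [decide_eq_decide] at this
      omega
    have hey : s.getD (s.filter (fun v => decide (v < x))).length 0 ≤ y := by
      have := hpp2 _ hc1len
      simp only [decide_eq_decide] at this
      omega
    have hxy : x ≤ y := le_trans hex hey
    have hsplit := filter_split x y hxy s
    -- s[lo] is a lower bound of every in-range element of s
    have hlb : ∀ v ∈ s, x ≤ v → v ≤ y →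
        s.getD (s.filter (fun v => decide (v < x))).length 0 ≤ v := by
      intro v hv hvx hvy
      rcases List.mem_iff_getElem.mp hv with ⟨j, hj, rfl⟩
      have hj1 := hpp1 j hj
      rw [List.getD_eq_getElem s 0 hj] at hj1
      simp only [decide_eq_decide] at hj1
      have hjc : (s.filter (fun v => decide (v < x))).length ≤ j := by omega
      rw [List.getD_eq_getElem s 0 hc1len]
      rcases Nat.eq_or_lt_of_le hjc with heq | hjlt
      · subst heq; exact le_refl _
      · exact (List.pairwise_iff_getElem.mp hpw) _ j hc1len hj hjlt
    have hel : s.getD (s.filter (fun v => decide (v < x))).length 0 ∈ l :=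
      hperm.mem_iff.mp (by
        rw [List.getD_eq_getElem s 0 hc1len]; exact List.getElem_mem hc1len)
    have hesub : s.getD (s.filter (fun v => decide (v < x))).length 0
        ∈ l.filter (fun v => decide (x ≤ v ∧ v ≤ y)) :=
      List.mem_filter.mpr ⟨hel, by simp only [decide_eq_true_eq]; exact ⟨hex, hey⟩⟩
    cases hsub : l.filter (fun v => decide (x ≤ v ∧ v ≤ y)) with
    | nil => rw [hsub] at hesub; simp at hesub
    | cons hh tt =>
        rw [hsub] at hesub
        have hmmem : tt.foldl min hh ∈ l.filter (fun v => decide (x ≤ v ∧ v ≤ y)) := by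
          rw [hsub]; exact foldl_min_mem tt hh
        have hme : tt.foldl min hh
            ≤ s.getD (s.filter (fun v => decide (v < x))).length 0 :=
          foldl_min_le tt hh _ hesub
        have hem : s.getD (s.filter (fun v => decide (v < x))).length 0
            ≤ tt.foldl min hh := by
          have hml := (List.mem_filter.mp hmmem).1
          have hmR := (List.mem_filter.mp hmmem).2
          simp only [decide_eq_true_eq] at hmR
          exact hlb _ (hperm.mem_iff.mpr hml) hmR.1 hmR.2
        have hlen : (l.filter (fun v => decide (x ≤ v ∧ v ≤ y))).length
            = tt.length + 1 := by rw [hsub]; simp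
        have hcount : (s.filter (fun v => decide (v ≤ y))).length
            = (s.filter (fun v => decide (v < x))).length + (tt.length + 1) := by
          rw [← hlen, ← hfperm]; exact hsplit
        simp only [Prod.mk.injEq]
        constructor
        · simp only [List.length_cons]
          rw [hcount]; push_cast; omega
        · rw [show runMin none (hh :: tt) = runMin (some hh) tt from rfl,
            runMin_some, le_antisymm hem hme]
  · rw [if_neg hlt]
    have hnil : s.filter (fun v => decide (x ≤ v ∧ v ≤ y)) = [] := by
      rw [List.filter_eq_nil_iff]
      intro v hv hpv
      simp only [decide_eq_true_eq] at hpv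
      rcases List.mem_iff_getElem.mp hv with ⟨j, hj, rfl⟩
      have hj1 := hpp1 j hj
      have hj2 := hpp2 j hj
      rw [List.getD_eq_getElem s 0 hj] at hj1 hj2
      simp only [decide_eq_decide] at hj1 hj2
      omega
    have hlnil : l.filter (fun v => decide (x ≤ v ∧ v ≤ y)) = [] := by
      have := hfperm
      rw [hnil] at this
      exact List.length_eq_zero_iff.mp this.symm
    rw [hlnil]
    simp [runMin]
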